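-- pv_equiv track=rewrite | github.com/sergey200519/pyAliceKit | module/date_time2.py | n_continue
-- ===== SOURCE A (Python) =====
-- def n_continue(string, this_word, need_word):
--     i = 0
--     status = False
--     for item in string.split(" "):
--         if item == this_word:
--             status = True
--         if item == need_word:
--             status = False
--             return i
--         if status:
--             i += 1
-- ===== SOURCE B (Python) =====
-- def n_continue(string, this_word, need_word):
--     words = string.split(" ")
--     if need_word not in words:
--         return None
--     k = words.index(need_word)
--     prefix = words[:k]
--     if this_word in prefix:
--         return k - prefix.index(this_word)
--     return 0
-- ===== Notes on version B (the rewrite author's own statement) =====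
-- stated objective: simpler
-- what changed: Replaced the flag-and-counter single scan with endpoint arithmetic: split once, locate the first need_word, and compute the count as the distance from the first this_word in the prefix (or 0 / None), with no mutable status flag or increment loop.
import Mathlib
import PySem

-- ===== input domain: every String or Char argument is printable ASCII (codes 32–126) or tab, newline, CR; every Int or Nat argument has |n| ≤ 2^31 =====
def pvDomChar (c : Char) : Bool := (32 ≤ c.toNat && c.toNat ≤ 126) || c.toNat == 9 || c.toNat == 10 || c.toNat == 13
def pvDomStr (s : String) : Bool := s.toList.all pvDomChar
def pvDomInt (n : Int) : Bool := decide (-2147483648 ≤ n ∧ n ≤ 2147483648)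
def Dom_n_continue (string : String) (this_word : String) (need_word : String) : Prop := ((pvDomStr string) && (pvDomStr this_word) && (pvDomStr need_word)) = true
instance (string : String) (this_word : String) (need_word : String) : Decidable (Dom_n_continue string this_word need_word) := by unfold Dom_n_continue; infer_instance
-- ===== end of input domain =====

-- B computes the same count by endpoint arithmetic on first-occurrence indices instead of A's
-- status-flag-and-counter scan (objective: simpler); same return value everywhere, A is total.

-- ===== PORT A =====
-- the for-loop over string.split(" ") with state (i, status); falling off the loop returns None
def nContLoopA (this_word need_word : String) : List String → Int → Bool → Option Int
  | [], _, _ => none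
  | item :: rest, i, status =>
    let status1 := if item = this_word then true else status
    if item = need_word then some i
    else nContLoopA this_word need_word rest (if status1 then i + 1 else i) status1

def n_continue (string : String) (this_word : String) (need_word : String) : Option Int :=
  nContLoopA this_word need_word ((PySem.Str.split? string " ").getD []) 0 false

-- ===== PORT B =====
def n_continue_alt (string : String) (this_word : String) (need_word : String) : Option Int :=
  let words := (PySem.Str.split? string " ").getD []
  match PySem.List.index? words need_word with
  | none => none                                    -- need_word not in words
  | some k =>
    let pre := words.take k                          -- words[:k]
    match PySem.List.index? pre this_word with
    | some j => some ((k : Int) - (j : Int))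
    | none => some 0

-- ===== PRECONDITION & SPEC =====
def Spec_n_continue (string : String) (this_word : String) (need_word : String) (out : Option Int) : Prop := out = n_continue_alt string this_word need_word
instance (string : String) (this_word : String) (need_word : String) (out : Option Int) : Decidable (Spec_n_continue string this_word need_word out) := by unfold Spec_n_continue; infer_instance

-- ===== CLAIM (what is proved, stated in full; the proofs are below) =====
def Claim_equal_n_continue : Prop := ∀ (string : String) (this_word : String) (need_word : String), Dom_n_continue string this_word need_word → Spec_n_continue string this_word need_word (n_continue string this_word need_word)

-- ===== LEMMAS AND PROOFS =====

-- once the status flag is true, the loop just counts words up to the first need_word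
theorem nContLoopA_true (t n : String) (ws : List String) (i : Int) :
    nContLoopA t n ws i true = (PySem.List.index? ws n).map (fun k => i + (k : Int)) := by
  induction ws generalizing i with
  | nil => simp [nContLoopA, PySem.List.index?_eq_idxOf?]
  | cons item rest ih =>
    by_cases hn : item = n
    · subst hn
      rw [PySem.List.index?_cons_self]
      simp [nContLoopA]
    · rw [PySem.List.index?_cons_of_ne _ hn]
      simp only [nContLoopA, if_neg hn, if_pos, ite_self]
      rw [ih]
      cases PySem.List.index? rest n with
      | none => rfl
      | some k => simp; ring

-- with the flag still false, the loop's value in terms of first-occurrence indices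
theorem nContLoopA_false (t n : String) (ws : List String) (i : Int) :
    nContLoopA t n ws i false =
      (match PySem.List.index? ws n with
       | none => none
       | some k =>
         match PySem.List.index? (ws.take k) t with
         | some j => some (i + ((k : Int) - (j : Int)))
         | none => some i) := by
  induction ws generalizing i with
  | nil => simp [nContLoopA, PySem.List.index?_eq_idxOf?]
  | cons item rest ih =>
    by_cases hn : item = n
    · subst hn
      rw [PySem.List.index?_cons_self]
      simp [nContLoopA]
    · rw [PySem.List.index?_cons_of_ne _ hn]
      by_cases ht : item = t
      · subst ht
        simp only [nContLoopA, if_neg hn, if_true]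
        rw [nContLoopA_true]
        cases PySem.List.index? rest n with
        | none => rfl
        | some k =>
          simp [List.take_succ_cons, List.idxOf?_cons]
          ring
      · simp only [nContLoopA, if_neg ht, if_neg hn]
        rw [ih]
        cases PySem.List.index? rest n with
        | none => rfl
        | some k =>
          simp only [Option.map_some, List.take_succ_cons]
          rw [PySem.List.index?_cons_of_ne _ ht]
          cases PySem.List.index? (rest.take k) t with
          | none => rfl
          | some j => simp

-- ===== VERDICT (by name: the statement is the Claim_ definition above) =====
theorem n_continue_spec : Claim_equal_n_continue := by
  intro s t n _
  unfold Spec_n_continue n_continue n_continue_alt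
  rw [nContLoopA_false]
  cases h : PySem.List.index? ((PySem.Str.split? s " ").getD []) n with
  | none => simp only [h]
  | some k =>
    simp only [h]
    cases PySem.List.index? (((PySem.Str.split? s " ").getD []).take k) t with
    | none => rfl
    | some j => simp
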